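-- pv_equiv track=rewrite | github.com/kbaikov/adventofcode2017 | advent2017_9.py | score_group
-- ===== SOURCE A (Python) =====
-- def score_group(s):
--     counter = score = 0
--     for char in s:
--         if char == "{":
--             counter += 1
--         if char == "}":
--             score += counter
--             counter -= 1
--     return score
-- ===== SOURCE B (Python) =====
-- def score_group(s):
--     # Build a prefix-depth table, then sum depths at closing braces.
--     prefix = [0]
--     t = 0
--     for c in s:
--         t += 1 if c == "{" else -1 if c == "}" else 0
--         prefix.append(t)
--     return sum(p for p, c in zip(prefix, s) if c == "}")
-- ===== Notes on version B (the rewrite author's own statement) =====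
-- stated objective: alternative
-- what changed: Replaces the single running-counter pass (score accumulated inline on '}') with a prefix-depth table built first and a separate summation pass over (depth, char) pairs selecting the closing braces.
import Mathlib
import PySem

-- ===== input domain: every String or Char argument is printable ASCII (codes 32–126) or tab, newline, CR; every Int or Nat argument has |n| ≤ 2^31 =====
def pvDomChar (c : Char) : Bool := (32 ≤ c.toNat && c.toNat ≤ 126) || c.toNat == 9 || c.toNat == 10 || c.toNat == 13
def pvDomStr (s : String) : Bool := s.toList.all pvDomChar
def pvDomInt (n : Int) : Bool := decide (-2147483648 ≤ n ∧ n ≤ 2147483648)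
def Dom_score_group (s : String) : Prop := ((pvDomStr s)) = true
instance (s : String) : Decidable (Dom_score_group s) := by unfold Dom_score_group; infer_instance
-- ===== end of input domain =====

-- B builds a prefix-depth table first, then sums depths at closing braces, instead of A's inline running-counter accumulation. Same cost (alternative decomposition).

-- ===== PORT A =====
-- state = (counter, score); both ifs applied in order, as in A
def score_group (s : String) : Int :=
  (s.toList.foldl (fun (st : Int × Int) char =>
      let st := if char = '{' then (st.1 + 1, st.2) else st
      if char = '}' then (st.1 - 1, st.2 + st.1) else st) (0, 0)).2

-- ===== PORT B =====
def pvDelta (c : Char) : Int := if c = '{' then 1 else if c = '}' then -1 else 0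

def score_group_alt (s : String) : Int :=
  let l := s.toList
  -- loop 1: prefix = [0]; t = 0; for c in s: t += δ(c); prefix.append(t)
  let pt := l.foldl (fun (pt : List Int × Int) c =>
      let t := pt.2 + pvDelta c
      (pt.1 ++ [t], t)) ([0], 0)
  -- loop 2: sum(p for p, c in zip(prefix, s) if c == "}")
  (pt.1.zip l).foldl (fun acc pc => if pc.2 = '}' then acc + pc.1 else acc) 0

-- ===== PRECONDITION & SPEC =====
def Spec_score_group (s : String) (out : Int) : Prop := out = score_group_alt s
instance (s : String) (out : Int) : Decidable (Spec_score_group s out) := by unfold Spec_score_group; infer_instance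

-- ===== CLAIM (what is proved, stated in full; the proofs are below) =====
def Claim_equal_score_group : Prop := ∀ (s : String), Dom_score_group s → Spec_score_group s (score_group s)

-- ===== LEMMAS AND PROOFS =====

/-- scan t l = list of running prefix depths after each char of l, starting from t. -/
def pvScan (t : Int) : List Char → List Int
  | [] => []
  | c :: l => (t + pvDelta c) :: pvScan (t + pvDelta c) l

theorem pvBuild (l : List Char) : ∀ (p : List Int) (t : Int),
    (l.foldl (fun (pt : List Int × Int) c =>
      let t := pt.2 + pvDelta c
      (pt.1 ++ [t], t)) (p, t)).1 = p ++ pvScan t l := by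
  induction l with
  | nil => intro p t; simp [pvScan]
  | cons c l ih =>
    intro p t
    simp only [List.foldl_cons, pvScan]
    rw [ih]
    simp

theorem pvMain (l : List Char) : ∀ (t s : Int),
    (l.foldl (fun (st : Int × Int) char =>
        let st := if char = '{' then (st.1 + 1, st.2) else st
        if char = '}' then (st.1 - 1, st.2 + st.1) else st) (t, s)).2
      = ((t :: pvScan t l).zip l).foldl
          (fun acc pc => if pc.2 = '}' then acc + pc.1 else acc) s := by
  induction l with
  | nil => intro t s; simp
  | cons c l ih =>
    intro t s
    simp only [List.foldl_cons, pvScan, List.zip_cons_cons]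
    by_cases h1 : c = '{'
    · subst h1
      have : ('{' : Char) ≠ '}' := by decide
      simp [this, pvDelta, ih]
    · by_cases h2 : c = '}'
      · subst h2
        simp [h1, pvDelta, ih]
        rw [sub_eq_add_neg]
      · simp [h1, h2, pvDelta, ih]

-- ===== VERDICT (by name: the statement is the Claim_ definition above) =====
theorem score_group_spec : Claim_equal_score_group := by
  intro s _
  unfold Spec_score_group score_group score_group_alt
  simp only [pvBuild, pvMain, List.singleton_append]
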